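-- pv_equiv track=rewrite | github.com/rahdirs11/GeeksForGeeks | Algorithms/Bitwise/minBitsToFlip^ABC.py | minBits
-- ===== SOURCE A (Python) =====
-- def minBits(a: int, b: int, c: int) -> int:
-- 	xor = a ^ b ^ c
-- 	count = 0
-- 	while xor > 0:
-- 		if xor & 1:
-- 			count += 1
--
-- 		xor //= 2
--
-- 	return count
-- ===== SOURCE B (Python) =====
-- def minBits(a: int, b: int, c: int) -> int:
--     n = a ^ b ^ c
--     count = 0
--     while n > 0:
--         n &= n - 1
--         count += 1
--     return count
-- ===== Notes on version B (the rewrite author's own statement) =====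
-- stated objective: alternative
-- what changed: Replaces the per-bit-position shift loop with Kernighan's n &= n-1 loop that clears one set bit per iteration (same > 0 guard, so non-positive xor still yields 0).
import Mathlib
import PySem

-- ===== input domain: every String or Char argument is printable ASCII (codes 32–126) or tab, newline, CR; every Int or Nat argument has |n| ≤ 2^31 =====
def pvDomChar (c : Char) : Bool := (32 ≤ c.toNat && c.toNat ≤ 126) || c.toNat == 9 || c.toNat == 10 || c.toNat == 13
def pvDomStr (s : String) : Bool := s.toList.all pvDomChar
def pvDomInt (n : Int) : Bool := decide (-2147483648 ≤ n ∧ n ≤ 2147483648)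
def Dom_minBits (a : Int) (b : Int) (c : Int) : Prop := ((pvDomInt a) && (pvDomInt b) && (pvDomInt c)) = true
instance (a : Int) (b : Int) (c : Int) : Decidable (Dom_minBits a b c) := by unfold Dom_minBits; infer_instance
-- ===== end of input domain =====

-- B replaces A's per-bit-position halving loop with Kernighan's `n &= n - 1` loop
-- (one iteration per SET bit, same `> 0` guard); return values proved equal on all of Dom.

-- ===== PORT A =====
-- `while xor > 0: if xor & 1: count += 1; xor //= 2`
def minBitsLoop (x : Int) (count : Int) : Int :=
  if 0 < x then
    minBitsLoop (PySem.Int.floordiv x 2)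
      (if PySem.Int.band x 1 ≠ 0 then count + 1 else count)
  else count
termination_by x.toNat
decreasing_by
  rw [PySem.Int.floordiv_eq_ediv_of_pos (by norm_num)]
  omega

def minBits (a : Int) (b : Int) (c : Int) : Int :=
  minBitsLoop (PySem.Int.bxor (PySem.Int.bxor a b) c) 0

-- ===== PORT B =====
-- `while n > 0: n &= n - 1; count += 1`
def kernLoop (n : Int) (count : Int) : Int :=
  if 0 < n then
    kernLoop (PySem.Int.band n (n - 1)) (count + 1)
  else count
termination_by n.toNat
decreasing_by
  rw [PySem.Int.band_of_nonneg (by omega) (by omega)]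
  have h2 : n.toNat &&& (n - 1).toNat ≤ (n - 1).toNat := Nat.and_le_right
  simp only [Int.toNat_natCast]
  omega

def minBits_alt (a : Int) (b : Int) (c : Int) : Int :=
  kernLoop (PySem.Int.bxor (PySem.Int.bxor a b) c) 0

-- ===== PRECONDITION & SPEC =====
def Spec_minBits (a : Int) (b : Int) (c : Int) (out : Int) : Prop := out = minBits_alt a b c
instance (a : Int) (b : Int) (c : Int) (out : Int) : Decidable (Spec_minBits a b c out) := by unfold Spec_minBits; infer_instance

-- ===== CLAIM (what is proved, stated in full; the proofs are below) =====
def Claim_equal_minBits : Prop := ∀ (a : Int) (b : Int) (c : Int), Dom_minBits a b c → Spec_minBits a b c (minBits a b c)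

-- ===== LEMMAS AND PROOFS =====

-- A's loop on a nonnegative value accumulates the bit count.
theorem minBitsLoop_eq (m : Nat) (c : Int) :
    minBitsLoop (m : Int) c = c + (PySem.Int.bitCount (m : Int) : Int) := by
  induction m using Nat.strong_induction_on generalizing c with
  | _ m ih =>
    rcases Nat.eq_zero_or_pos m with hm | hm
    · subst hm; rw [minBitsLoop]; simp [PySem.Int.bitCount_zero]
    · rw [minBitsLoop]
      have hpos : (0 : Int) < (m : Int) := by exact_mod_cast hm
      have hmod : PySem.Int.mod (m : Int) 2 = ((m % 2 : Nat) : Int) := by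
        exact_mod_cast PySem.Int.mod_natCast m 2
      have hdiv : PySem.Int.floordiv (m : Int) 2 = ((m / 2 : Nat) : Int) := by
        exact_mod_cast PySem.Int.floordiv_natCast m 2
      rw [if_pos hpos, PySem.Int.band_one, hmod, hdiv]
      rw [ih (m / 2) (Nat.div_lt_self hm (by norm_num))]
      rw [PySem.Int.bitCount_natCast hm]
      rcases Nat.mod_two_eq_zero_or_one m with h2 | h2
      · simp [h2]
      · simp [h2]; omega

-- Clearing the lowest set bit removes exactly one from the bit count.
theorem bitCount_and_pred (m : Nat) (hm : 0 < m) :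
    (PySem.Int.bitCount ((m &&& (m - 1) : Nat) : Int) : Int) + 1
      = (PySem.Int.bitCount (m : Int) : Int) := by
  induction m using Nat.strong_induction_on with
  | _ m ih =>
    rcases Nat.even_or_odd m with ⟨k, hk'⟩ | ⟨k, hk'⟩
    · -- m = 2k, k > 0 : m &&& (m-1) = 2 * (k &&& (k-1))
      have hk : m = 2 * k := by omega
      have hk0 : 0 < k := by omega
      have hand : (2 * k) &&& (2 * k - 1) = 2 * (k &&& (k - 1)) := by
        rcases Nat.eq_zero_or_pos (k - 1) with h1 | h1
        · have hk1 : k = 1 := by omega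
          subst hk1; decide
        · have hrw : 2 * k - 1 = 2 * (k - 1) + 1 := by omega
          rw [hrw]
          have h := Nat.bitwise_bit (f := and) (by simp) false k true (k - 1)
          simp only [Nat.bit] at h
          simpa [HAnd.hAnd, AndOp.and, Nat.land, Nat.mul_comm] using h
      have hdouble : ∀ j : Nat, (PySem.Int.bitCount ((2 * j : Nat) : Int) : Int)
          = (PySem.Int.bitCount (j : Int) : Int) := by
        intro j
        rcases Nat.eq_zero_or_pos j with hj | hj
        · simp [hj]
        · rw [PySem.Int.bitCount_natCast (by omega : 0 < 2 * j)]
          simp [Nat.mul_div_cancel_left _ (by norm_num : 0 < 2), Nat.mul_mod_right]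
      rw [hk, hand, hdouble, hdouble]
      exact ih k (by omega) hk0
    · -- m = 2k + 1 : m &&& (m-1) = 2k
      have hk : m = 2 * k + 1 := by omega
      have hand : (2 * k + 1) &&& (2 * k) = 2 * k := by
        have h := Nat.bitwise_bit (f := and) (by simp) true k false k
        have h2 : Nat.bitwise and k k = k := by
          simpa [HAnd.hAnd, AndOp.and, Nat.land] using Nat.and_self k
        simp only [Nat.bit] at h
        simpa [HAnd.hAnd, AndOp.and, Nat.land, h2, Nat.mul_comm] using h
      have hrw : 2 * k + 1 - 1 = 2 * k := by omega
      rw [hk, hrw, hand]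
      rw [PySem.Int.bitCount_natCast (by omega : 0 < 2 * k + 1)]
      have hq : (2 * k + 1) / 2 = k := by omega
      have hr : (2 * k + 1) % 2 = 1 := by omega
      rcases Nat.eq_zero_or_pos k with hk0 | hk0
      · simp [hk0]
      · rw [PySem.Int.bitCount_natCast (by omega : 0 < 2 * k), hq, hr]
        have hq2 : (2 * k) / 2 = k := by omega
        have hr2 : (2 * k) % 2 = 0 := by omega
        rw [hq2, hr2]
        push_cast
        ring

-- B's loop on a nonnegative value also accumulates the bit count.
theorem kernLoop_eq (m : Nat) (c : Int) :
    kernLoop (m : Int) c = c + (PySem.Int.bitCount (m : Int) : Int) := by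
  induction m using Nat.strong_induction_on generalizing c with
  | _ m ih =>
    rcases Nat.eq_zero_or_pos m with hm | hm
    · subst hm; rw [kernLoop]; simp [PySem.Int.bitCount_zero]
    · rw [kernLoop]
      have hpos : (0 : Int) < (m : Int) := by exact_mod_cast hm
      rw [if_pos hpos]
      have hcast : (m : Int) - 1 = ((m - 1 : Nat) : Int) := by omega
      rw [hcast, PySem.Int.band_natCast]
      have hlt : m &&& (m - 1) < m := by
        have h : m &&& (m - 1) ≤ m - 1 := Nat.and_le_right
        omega
      rw [ih _ hlt (c + 1)]
      have := bitCount_and_pred m hm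
      omega

-- ===== VERDICT (by name: the statement is the Claim_ definition above) =====
theorem minBits_spec : Claim_equal_minBits := by
  intro a b c _
  unfold Spec_minBits minBits minBits_alt
  set x := PySem.Int.bxor (PySem.Int.bxor a b) c with hx
  rcases lt_or_ge 0 x with hpos | hnp
  · have hx' : x = ((x.toNat : Nat) : Int) := by omega
    rw [hx', minBitsLoop_eq, kernLoop_eq]
  · rw [minBitsLoop, kernLoop]
    rw [if_neg (by omega : ¬ 0 < x), if_neg (by omega : ¬ 0 < x)]
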